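-- pv_equiv track=rewrite | github.com/dlugo7/Manhattan-Distance-Neighborhood-Calculator | interview_solution.py | calculate_manhattan_neighborhood
-- ===== SOURCE A (Python) =====
-- from typing import List, Tuple
--
-- def find_positive_cells(grid: List[List[int]]) -> List[Tuple[int, int]]:
--     """Find all cells containing positive values"""
--     positive_cells = []
--     for row in range(len(grid)):
--         for col in range(len(grid[0])):
--             if grid[row][col] > 0:
--                 positive_cells.append((row, col))
--     return positive_cells
--
-- def calculate_manhattan_neighborhood(grid: List[List[int]], n: int) -> int:
--     """
--     Calculate the number of unique cells within Manhattan distance N of any positive cell.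
--
--     Args:
--         grid: 2D list representing the grid
--         n: Manhattan distance threshold (N >= 0)
--
--     Returns:
--         Number of unique cells in the neighborhood
--     """
--     if not grid or not grid[0]:
--         return 0
--
--     if n < 0:
--         return 0
--
--     # Find all positive cells
--     positive_cells = find_positive_cells(grid)
--
--     if not positive_cells:
--         return 0
--
--     # Calculate neighborhood for all positive cells
--     all_neighborhoods = set()
--     grid_height = len(grid)
--     grid_width = len(grid[0])
--
--     for pos_row, pos_col in positive_cells:
--         # For each positive cell, find all cells within Manhattan distance N
--         for distance in range(n + 1):
--             for row_offset in range(-distance, distance + 1):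
--                 remaining_distance = distance - abs(row_offset)
--                 for col_offset in range(-remaining_distance, remaining_distance + 1):
--                     new_row = pos_row + row_offset
--                     new_col = pos_col + col_offset
--
--                     # Check bounds
--                     if 0 <= new_row < grid_height and 0 <= new_col < grid_width:
--                         all_neighborhoods.add((new_row, new_col))
--
--     return len(all_neighborhoods)
-- ===== SOURCE B (Python) =====
-- from typing import List
--
--
-- def calculate_manhattan_neighborhood(grid: List[List[int]], n: int) -> int:
--     if not grid or not grid[0]:
--         return 0
--     if n < 0:
--         return 0
--     width = len(grid[0])
--     positives = [(r, c) for r, row in enumerate(grid) for c in range(width) if row[c] > 0]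
--     count = 0
--     for r in range(len(grid)):
--         for c in range(width):
--             if any(abs(r - pr) + abs(c - pc) <= n for pr, pc in positives):
--                 count += 1
--     return count
-- ===== Notes on version B (the rewrite author's own statement) =====
-- stated objective: alternative
-- what changed: Instead of enumerating the whole Manhattan diamond around every positive cell into a set and returning its size, B makes one pass over the grid cells and counts those within distance n of some positive cell, so the set and the per-distance diamond enumeration disappear.
import Mathlib
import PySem

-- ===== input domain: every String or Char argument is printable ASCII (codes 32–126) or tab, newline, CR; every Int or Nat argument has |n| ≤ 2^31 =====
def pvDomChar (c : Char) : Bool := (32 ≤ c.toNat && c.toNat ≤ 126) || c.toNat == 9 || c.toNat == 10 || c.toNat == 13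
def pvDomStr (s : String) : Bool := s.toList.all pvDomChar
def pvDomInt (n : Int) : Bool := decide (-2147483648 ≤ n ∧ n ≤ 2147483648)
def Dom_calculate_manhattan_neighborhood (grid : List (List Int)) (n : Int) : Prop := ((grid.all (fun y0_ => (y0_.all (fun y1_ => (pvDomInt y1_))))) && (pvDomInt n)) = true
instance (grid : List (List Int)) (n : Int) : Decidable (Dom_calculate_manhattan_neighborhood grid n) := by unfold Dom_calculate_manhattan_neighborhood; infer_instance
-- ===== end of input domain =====

-- B counts, in one pass over the grid cells, those within Manhattan distance n of some positive
-- cell, instead of A's diamond enumeration around every positive cell into a set (alternative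
-- algorithm of similar size; return-value equivalence on Pre_).

-- ===== PORT A =====
def find_positive_cells (grid : List (List Int)) : List (Int × Int) :=
  (PySem.List.pyRange 0 grid.length 1).foldl (fun acc row =>
    (PySem.List.pyRange 0 (PySem.List.pyGetD grid 0 []).length 1).foldl (fun acc col =>
      if 0 < PySem.List.pyGetD (PySem.List.pyGetD grid row []) col 0 then
        acc ++ [(row, col)]
      else acc) acc) []

def calculate_manhattan_neighborhood (grid : List (List Int)) (n : Int) : Int :=
  if grid.length = 0 ∨ (PySem.List.pyGetD grid 0 []).length = 0 then 0
  else if n < 0 then 0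
  else
    let positive_cells := find_positive_cells grid
    if positive_cells.length = 0 then 0
    else
      let grid_height : Int := grid.length
      let grid_width : Int := (PySem.List.pyGetD grid 0 []).length
      let all_neighborhoods : PySem.Set (Int × Int) :=
        positive_cells.foldl (fun s p =>
          (PySem.List.pyRange 0 (n + 1) 1).foldl (fun s d =>
            (PySem.List.pyRange (-d) (d + 1) 1).foldl (fun s ro =>
              let rem := d - |ro|
              (PySem.List.pyRange (-rem) (rem + 1) 1).foldl (fun s co =>
                let nr := p.1 + ro
                let nc := p.2 + co
                if 0 ≤ nr ∧ nr < grid_height ∧ 0 ≤ nc ∧ nc < grid_width then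
                  PySem.Set.add s (nr, nc)
                else s) s) s) s) PySem.Set.empty
      PySem.Set.len all_neighborhoods

-- ===== PORT B =====
def calculate_manhattan_neighborhood_alt (grid : List (List Int)) (n : Int) : Int :=
  if grid.length = 0 ∨ (PySem.List.pyGetD grid 0 []).length = 0 then 0
  else if n < 0 then 0
  else
    let width : Int := (PySem.List.pyGetD grid 0 []).length
    let positives : List (Int × Int) :=
      (PySem.List.enumerate grid 0).flatMap (fun rrow =>
        ((PySem.List.pyRange 0 width 1).filter (fun c =>
          0 < PySem.List.pyGetD rrow.2 c 0)).map (fun c => (rrow.1, c)))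
    (PySem.List.pyRange 0 grid.length 1).foldl (fun count r =>
      (PySem.List.pyRange 0 width 1).foldl (fun count c =>
        if positives.any (fun p => |r - p.1| + |c - p.2| ≤ n) then count + 1 else count) count) 0

-- ===== PRECONDITION & SPEC =====
-- Pre_ excludes exactly the inputs on which A raises IndexError: when the scan is reached
-- (nonempty grid, nonempty first row, n ≥ 0), every row must be at least as long as row 0.
def Pre_calculate_manhattan_neighborhood (grid : List (List Int)) (n : Int) : Prop :=
  grid = [] ∨ (grid.headD []).length = 0 ∨ n < 0 ∨
    ∀ row ∈ grid, (grid.headD []).length ≤ row.length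
instance (grid : List (List Int)) (n : Int) : Decidable (Pre_calculate_manhattan_neighborhood grid n) := by
  unfold Pre_calculate_manhattan_neighborhood; infer_instance
def pvWitness_calculate_manhattan_neighborhood : List (List Int) × Int := ([[1, 0], [0, -1]], 1)

def Spec_calculate_manhattan_neighborhood (grid : List (List Int)) (n : Int) (out : Int) : Prop := out = calculate_manhattan_neighborhood_alt grid n
instance (grid : List (List Int)) (n : Int) (out : Int) : Decidable (Spec_calculate_manhattan_neighborhood grid n out) := by unfold Spec_calculate_manhattan_neighborhood; infer_instance

-- ===== CLAIM (what is proved, stated in full; the proofs are below) =====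
def Claim_equal_calculate_manhattan_neighborhood : Prop := ∀ (grid : List (List Int)) (n : Int), Dom_calculate_manhattan_neighborhood grid n → Pre_calculate_manhattan_neighborhood grid n → Spec_calculate_manhattan_neighborhood grid n (calculate_manhattan_neighborhood grid n)

-- ===== LEMMAS AND PROOFS =====

-- the logical cell predicate both positive-cell scans compute
def cellPos (grid : List (List Int)) (p : Int × Int) : Prop :=
  0 ≤ p.1 ∧ p.1 < (grid.length : Int) ∧ 0 ≤ p.2 ∧ p.2 < ((PySem.List.pyGetD grid 0 []).length : Int) ∧
    0 < PySem.List.pyGetD (PySem.List.pyGetD grid p.1 []) p.2 0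

-- generic: membership in a foldl whose step satisfies a membership law
theorem mem_foldl_step {α β : Type} (f : List α → β → List α) (P : β → α → Prop)
    (h : ∀ s x y, y ∈ f s x ↔ y ∈ s ∨ P x y) :
    ∀ (l : List β) (s : List α) (y : α), y ∈ l.foldl f s ↔ y ∈ s ∨ ∃ x ∈ l, P x y := by
  intro l
  induction l with
  | nil => simp
  | cons a t ih => intro s y; simp only [List.foldl_cons, ih, h, List.mem_cons]; aesop

-- generic: a foldl whose step preserves Nodup preserves Nodup
theorem nodup_foldl_step {α β : Type} (f : List α → β → List α)
    (h : ∀ s x, s.Nodup → (f s x).Nodup) :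
    ∀ (l : List β) (s : List α), s.Nodup → (l.foldl f s).Nodup := by
  intro l
  induction l with
  | nil => intro s hs; simpa using hs
  | cons a t ih => intro s hs; exact ih _ (h s a hs)

theorem mem_find_positive_cells (grid : List (List Int)) (y : Int × Int) :
    y ∈ find_positive_cells grid ↔ cellPos grid y := by
  obtain ⟨a, b⟩ := y
  unfold find_positive_cells
  simp only [PySem.List.foldl_append_ite, PySem.List.foldl_append_eq_flatMap, List.nil_append,
    List.mem_flatMap, List.mem_map, List.mem_filter, PySem.List.mem_pyRange_one, cellPos,
    decide_eq_true_eq]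
  constructor
  · rintro ⟨row, ⟨h0, h1⟩, col, ⟨⟨h2, h3⟩, h4⟩, heq⟩
    cases heq
    exact ⟨h0, h1, h2, h3, h4⟩
  · rintro ⟨h0, h1, h2, h3, h4⟩
    exact ⟨a, ⟨h0, h1⟩, b, ⟨⟨h2, h3⟩, h4⟩, rfl⟩

theorem mem_positives_alt (grid : List (List Int)) (y : Int × Int) :
    y ∈ ((PySem.List.enumerate grid 0).flatMap (fun rrow =>
        ((PySem.List.pyRange 0 ((PySem.List.pyGetD grid 0 []).length : Int) 1).filter (fun c =>
          0 < PySem.List.pyGetD rrow.2 c 0)).map (fun c => (rrow.1, c)))) ↔ cellPos grid y := by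
  obtain ⟨a, b⟩ := y
  rw [PySem.List.enumerate_eq_map_pyRange grid []]
  simp only [List.flatMap_map, List.mem_flatMap, List.mem_map, List.mem_filter,
    PySem.List.mem_pyRange_one, cellPos, decide_eq_true_eq, PySem.List.len_eq]
  constructor
  · rintro ⟨row, ⟨h0, h1⟩, col, ⟨⟨h2, h3⟩, h4⟩, heq⟩
    cases heq
    exact ⟨h0, h1, h2, h3, h4⟩
  · rintro ⟨h0, h1, h2, h3, h4⟩
    exact ⟨a, ⟨h0, h1⟩, b, ⟨⟨h2, h3⟩, h4⟩, rfl⟩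

-- per-positive-cell diamond: membership law of the three nested distance loops of A
theorem mem_diamond (H W n : Int) (p : Int × Int) (s : PySem.Set (Int × Int)) (y : Int × Int) :
    y ∈ (PySem.List.pyRange 0 (n + 1) 1).foldl (fun s d =>
          (PySem.List.pyRange (-d) (d + 1) 1).foldl (fun s ro =>
            let rem := d - |ro|
            (PySem.List.pyRange (-rem) (rem + 1) 1).foldl (fun s co =>
              let nr := p.1 + ro
              let nc := p.2 + co
              if 0 ≤ nr ∧ nr < H ∧ 0 ≤ nc ∧ nc < W then PySem.Set.add s (nr, nc) else s) s) s) s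
    ↔ y ∈ s ∨ ((0 ≤ y.1 ∧ y.1 < H ∧ 0 ≤ y.2 ∧ y.2 < W) ∧ |y.1 - p.1| + |y.2 - p.2| ≤ n) := by
  have h1 : ∀ (d ro : Int) (s : PySem.Set (Int × Int)) (y : Int × Int),
      y ∈ (PySem.List.pyRange (-(d - |ro|)) ((d - |ro|) + 1) 1).foldl (fun s co =>
            let nr := p.1 + ro
            let nc := p.2 + co
            if 0 ≤ nr ∧ nr < H ∧ 0 ≤ nc ∧ nc < W then PySem.Set.add s (nr, nc) else s) s
      ↔ y ∈ s ∨ ∃ co, (-(d - |ro|) ≤ co ∧ co < (d - |ro|) + 1) ∧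
          ((0 ≤ p.1 + ro ∧ p.1 + ro < H ∧ 0 ≤ p.2 + co ∧ p.2 + co < W) ∧ y = (p.1 + ro, p.2 + co)) := by
    intro d ro s y
    rw [mem_foldl_step _
      (fun co y => (0 ≤ p.1 + ro ∧ p.1 + ro < H ∧ 0 ≤ p.2 + co ∧ p.2 + co < W) ∧ y = (p.1 + ro, p.2 + co))
      (by intro s co y
          dsimp only
          split_ifs with hg
          · simp only [PySem.Set.mem_add]; tauto
          · tauto)]
    simp only [PySem.List.mem_pyRange_one]
  have h2 : ∀ (d : Int) (s : PySem.Set (Int × Int)) (y : Int × Int),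
      y ∈ (PySem.List.pyRange (-d) (d + 1) 1).foldl (fun s ro =>
            let rem := d - |ro|
            (PySem.List.pyRange (-rem) (rem + 1) 1).foldl (fun s co =>
              let nr := p.1 + ro
              let nc := p.2 + co
              if 0 ≤ nr ∧ nr < H ∧ 0 ≤ nc ∧ nc < W then PySem.Set.add s (nr, nc) else s) s) s
      ↔ y ∈ s ∨ ∃ ro, (-d ≤ ro ∧ ro < d + 1) ∧ ∃ co, (-(d - |ro|) ≤ co ∧ co < (d - |ro|) + 1) ∧
          ((0 ≤ p.1 + ro ∧ p.1 + ro < H ∧ 0 ≤ p.2 + co ∧ p.2 + co < W) ∧ y = (p.1 + ro, p.2 + co)) := by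
    intro d s y
    rw [mem_foldl_step _
      (fun ro y => ∃ co, (-(d - |ro|) ≤ co ∧ co < (d - |ro|) + 1) ∧
          ((0 ≤ p.1 + ro ∧ p.1 + ro < H ∧ 0 ≤ p.2 + co ∧ p.2 + co < W) ∧ y = (p.1 + ro, p.2 + co)))
      (fun s ro y => h1 d ro s y)]
    simp only [PySem.List.mem_pyRange_one]
  rw [mem_foldl_step _
    (fun d y => ∃ ro, (-d ≤ ro ∧ ro < d + 1) ∧ ∃ co, (-(d - |ro|) ≤ co ∧ co < (d - |ro|) + 1) ∧
        ((0 ≤ p.1 + ro ∧ p.1 + ro < H ∧ 0 ≤ p.2 + co ∧ p.2 + co < W) ∧ y = (p.1 + ro, p.2 + co)))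
    (fun s d y => h2 d s y)]
  apply or_congr Iff.rfl
  simp only [PySem.List.mem_pyRange_one]
  obtain ⟨y1, y2⟩ := y
  obtain ⟨p1, p2⟩ := p
  simp only [Int.abs_eq_natAbs]
  constructor
  · rintro ⟨d, ⟨hd0, hd1⟩, ro, ⟨hr0, hr1⟩, co, ⟨hc0, hc1⟩, ⟨g1, g2, g3, g4⟩, heq⟩
    injection heq with e1 e2
    subst e1; subst e2
    refine ⟨⟨?_, ?_, ?_, ?_⟩, ?_⟩ <;> omega
  · rintro ⟨⟨g1, g2, g3, g4⟩, hdist⟩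
    refine ⟨(↑(y1 - p1).natAbs + ↑(y2 - p2).natAbs : Int), ⟨by omega, by omega⟩,
      y1 - p1, ⟨by omega, by omega⟩, y2 - p2, ⟨by omega, by omega⟩,
      ⟨by omega, by omega, by omega, by omega⟩, ?_⟩
    have e1 : p1 + (y1 - p1) = y1 := by ring
    have e2 : p2 + (y2 - p2) = y2 := by ring
    rw [e1, e2]

-- membership of A's accumulated neighbourhood set
theorem mem_Aset (H W n : Int) (pcs : List (Int × Int)) (y : Int × Int) :
    y ∈ pcs.foldl (fun s p =>
          (PySem.List.pyRange 0 (n + 1) 1).foldl (fun s d =>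
            (PySem.List.pyRange (-d) (d + 1) 1).foldl (fun s ro =>
              let rem := d - |ro|
              (PySem.List.pyRange (-rem) (rem + 1) 1).foldl (fun s co =>
                let nr := p.1 + ro
                let nc := p.2 + co
                if 0 ≤ nr ∧ nr < H ∧ 0 ≤ nc ∧ nc < W then PySem.Set.add s (nr, nc) else s) s) s) s)
          PySem.Set.empty
    ↔ ∃ p ∈ pcs, (0 ≤ y.1 ∧ y.1 < H ∧ 0 ≤ y.2 ∧ y.2 < W) ∧ |y.1 - p.1| + |y.2 - p.2| ≤ n := by
  rw [mem_foldl_step _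
    (fun p y => (0 ≤ y.1 ∧ y.1 < H ∧ 0 ≤ y.2 ∧ y.2 < W) ∧ |y.1 - p.1| + |y.2 - p.2| ≤ n)
    (fun s p y => mem_diamond H W n p s y)]
  simp [PySem.Set.empty]

theorem nodup_Aset (H W n : Int) (pcs : List (Int × Int)) :
    (pcs.foldl (fun s p =>
          (PySem.List.pyRange 0 (n + 1) 1).foldl (fun s d =>
            (PySem.List.pyRange (-d) (d + 1) 1).foldl (fun s ro =>
              let rem := d - |ro|
              (PySem.List.pyRange (-rem) (rem + 1) 1).foldl (fun s co =>
                let nr := p.1 + ro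
                let nc := p.2 + co
                if 0 ≤ nr ∧ nr < H ∧ 0 ≤ nc ∧ nc < W then PySem.Set.add s (nr, nc) else s) s) s) s)
          PySem.Set.empty).Nodup := by
  refine nodup_foldl_step _ ?_ _ _ (by simp [PySem.Set.empty])
  intro s p hs
  refine nodup_foldl_step _ ?_ _ _ hs
  intro s d hs
  refine nodup_foldl_step _ ?_ _ _ hs
  intro s ro hs
  refine nodup_foldl_step _ ?_ _ _ hs
  intro s co hs
  dsimp only
  split_ifs
  · exact PySem.Set.nodup_add _ _ hs
  · exact hs

-- B's positive-cell list, as a standalone definition (proof helper)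
def positivesB (grid : List (List Int)) : List (Int × Int) :=
  (PySem.List.enumerate grid 0).flatMap (fun rrow =>
    ((PySem.List.pyRange 0 ((PySem.List.pyGetD grid 0 []).length : Int) 1).filter (fun c =>
      0 < PySem.List.pyGetD rrow.2 c 0)).map (fun c => (rrow.1, c)))

-- the list of counted cells, in B's traversal order
def selList (grid : List (List Int)) (n : Int) : List (Int × Int) :=
  (PySem.List.pyRange 0 grid.length 1).flatMap (fun r =>
    ((PySem.List.pyRange 0 ((PySem.List.pyGetD grid 0 []).length : Int) 1).filter (fun c =>
      (positivesB grid).any (fun p => |r - p.1| + |c - p.2| ≤ n))).map (fun c => (r, c)))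

theorem nodup_selList (grid : List (List Int)) (n : Int) : (selList grid n).Nodup := by
  unfold selList
  rw [List.nodup_flatMap]
  constructor
  · intro r _
    exact (List.Nodup.filter _ (PySem.List.nodup_pyRange_one _ _)).map
      (fun c c' h => by injection h)
  · refine (PySem.List.nodup_pyRange_one 0 _).imp ?_
    intro r r' hne zs hz hz'
    simp only [List.mem_map, List.mem_filter] at hz hz'
    obtain ⟨c, _, rfl⟩ := hz
    obtain ⟨c', _, he⟩ := hz'
    exact hne (by injection he with e _; exact e.symm ▸ rfl)

theorem mem_selList (grid : List (List Int)) (n : Int) (y : Int × Int) :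
    y ∈ selList grid n ↔
      (0 ≤ y.1 ∧ y.1 < (grid.length : Int) ∧ 0 ≤ y.2 ∧ y.2 < ((PySem.List.pyGetD grid 0 []).length : Int)) ∧
        ∃ p ∈ positivesB grid, |y.1 - p.1| + |y.2 - p.2| ≤ n := by
  obtain ⟨a, b⟩ := y
  unfold selList
  simp only [List.mem_flatMap, List.mem_map, List.mem_filter, PySem.List.mem_pyRange_one,
    List.any_eq_true, decide_eq_true_eq]
  constructor
  · rintro ⟨r, ⟨h0, h1⟩, c, ⟨⟨h2, h3⟩, p, hp, hd⟩, heq⟩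
    cases heq
    exact ⟨⟨h0, h1, h2, h3⟩, p, hp, hd⟩
  · rintro ⟨⟨h0, h1, h2, h3⟩, p, hp, hd⟩
    exact ⟨a, ⟨h0, h1⟩, b, ⟨⟨h2, h3⟩, p, hp, hd⟩, rfl⟩

-- B's value, in the main branch, is the length of selList
theorem alt_eq_selList (grid : List (List Int)) (n : Int)
    (h0 : ¬(grid.length = 0 ∨ (PySem.List.pyGetD grid 0 []).length = 0)) (hn : ¬ n < 0) :
    calculate_manhattan_neighborhood_alt grid n = ((selList grid n).length : Int) := by
  rw [calculate_manhattan_neighborhood_alt, if_neg h0, if_neg hn]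
  show (PySem.List.pyRange 0 grid.length 1).foldl (fun count r =>
      (PySem.List.pyRange 0 ((PySem.List.pyGetD grid 0 []).length : Int) 1).foldl (fun count c =>
        if (positivesB grid).any (fun p => |r - p.1| + |c - p.2| ≤ n) then count + 1 else count) count) 0
    = ((selList grid n).length : Int)
  have hinner : ∀ (r count : Int),
      (PySem.List.pyRange 0 ((PySem.List.pyGetD grid 0 []).length : Int) 1).foldl (fun count c =>
        if (positivesB grid).any (fun p => |r - p.1| + |c - p.2| ≤ n) then count + 1 else count) count
      = count + ((PySem.List.pyRange 0 ((PySem.List.pyGetD grid 0 []).length : Int) 1).countP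
          (fun c => (positivesB grid).any (fun p => |r - p.1| + |c - p.2| ≤ n)) : Int) :=
    fun r count => PySem.List.foldl_if_add_one _ _ _
  calc (PySem.List.pyRange 0 grid.length 1).foldl (fun count r =>
      (PySem.List.pyRange 0 ((PySem.List.pyGetD grid 0 []).length : Int) 1).foldl (fun count c =>
        if (positivesB grid).any (fun p => |r - p.1| + |c - p.2| ≤ n) then count + 1 else count) count) 0
      = (PySem.List.pyRange 0 grid.length 1).foldl (fun count r =>
          count + ((PySem.List.pyRange 0 ((PySem.List.pyGetD grid 0 []).length : Int) 1).countP
            (fun c => (positivesB grid).any (fun p => |r - p.1| + |c - p.2| ≤ n)) : Int)) 0 := by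
        exact PySem.List.foldl_congr_mem _ _ _ _ (fun count r _ => hinner r count)
    _ = ((selList grid n).length : Int) := by
        rw [PySem.List.foldl_add]
        unfold selList
        rw [List.length_flatMap]
        simp only [List.length_map, ← List.countP_eq_length_filter, Nat.cast_list_sum,
          List.map_map, zero_add]
        rfl

theorem mem_positivesB_iff_find (grid : List (List Int)) (p : Int × Int) :
    p ∈ positivesB grid ↔ p ∈ find_positive_cells grid := by
  rw [mem_find_positive_cells]
  exact mem_positives_alt grid p

-- A's value, in the main branch, is also the length of selList
theorem a_eq_selList (grid : List (List Int)) (n : Int)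
    (h0 : ¬(grid.length = 0 ∨ (PySem.List.pyGetD grid 0 []).length = 0)) (hn : ¬ n < 0) :
    calculate_manhattan_neighborhood grid n = ((selList grid n).length : Int) := by
  rw [calculate_manhattan_neighborhood, if_neg h0, if_neg hn]
  show (if (find_positive_cells grid).length = 0 then (0 : Int) else
      PySem.Set.len ((find_positive_cells grid).foldl (fun s p =>
        (PySem.List.pyRange 0 (n + 1) 1).foldl (fun s d =>
          (PySem.List.pyRange (-d) (d + 1) 1).foldl (fun s ro =>
            let rem := d - |ro|
            (PySem.List.pyRange (-rem) (rem + 1) 1).foldl (fun s co =>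
              let nr := p.1 + ro
              let nc := p.2 + co
              if 0 ≤ nr ∧ nr < (grid.length : Int) ∧ 0 ≤ nc ∧ nc < ((PySem.List.pyGetD grid 0 []).length : Int) then
                PySem.Set.add s (nr, nc)
              else s) s) s) s) PySem.Set.empty))
    = ((selList grid n).length : Int)
  by_cases hp : (find_positive_cells grid).length = 0
  · rw [if_pos hp]
    rw [List.length_eq_zero_iff] at hp
    have hsel : selList grid n = [] := by
      rw [List.eq_nil_iff_forall_not_mem]
      intro y hy
      rw [mem_selList] at hy
      obtain ⟨_, p, hp', _⟩ := hy
      rw [mem_positivesB_iff_find, hp] at hp'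
      exact (List.not_mem_nil) hp'
    rw [hsel]
    rfl
  · rw [if_neg hp]
    have hperm : ((find_positive_cells grid).foldl (fun s p =>
        (PySem.List.pyRange 0 (n + 1) 1).foldl (fun s d =>
          (PySem.List.pyRange (-d) (d + 1) 1).foldl (fun s ro =>
            let rem := d - |ro|
            (PySem.List.pyRange (-rem) (rem + 1) 1).foldl (fun s co =>
              let nr := p.1 + ro
              let nc := p.2 + co
              if 0 ≤ nr ∧ nr < (grid.length : Int) ∧ 0 ≤ nc ∧ nc < ((PySem.List.pyGetD grid 0 []).length : Int) then
                PySem.Set.add s (nr, nc)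
              else s) s) s) s) PySem.Set.empty).Perm (selList grid n) := by
      rw [List.perm_ext_iff_of_nodup (nodup_Aset _ _ _ _) (nodup_selList grid n)]
      intro y
      rw [mem_Aset, mem_selList]
      constructor
      · rintro ⟨p, hp', hin, hd⟩
        exact ⟨hin, p, (mem_positivesB_iff_find grid p).2 hp', hd⟩
      · rintro ⟨hin, p, hp', hd⟩
        exact ⟨p, (mem_positivesB_iff_find grid p).1 hp', hin, hd⟩
    simp only [PySem.Set.len]
    exact congrArg _ (hperm.length_eq)

-- ===== VERDICT (by name: the statement is the Claim_ definition above) =====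
theorem calculate_manhattan_neighborhood_spec : Claim_equal_calculate_manhattan_neighborhood := by
  intro grid n _ _
  unfold Spec_calculate_manhattan_neighborhood
  by_cases h0 : grid.length = 0 ∨ (PySem.List.pyGetD grid 0 []).length = 0
  · rw [calculate_manhattan_neighborhood, calculate_manhattan_neighborhood_alt, if_pos h0, if_pos h0]
  · by_cases hn : n < 0
    · rw [calculate_manhattan_neighborhood, calculate_manhattan_neighborhood_alt,
        if_neg h0, if_neg h0, if_pos hn, if_pos hn]
    · rw [a_eq_selList grid n h0 hn, alt_eq_selList grid n h0 hn]
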